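-- pv_equiv track=rewrite | github.com/202030481266/CP-Templates-and-Solutions | 周赛板刷/LCP/LCP 08. 剧情触发时间.py | getTriggerTime
-- ===== SOURCE A (Python) =====
-- from typing import List
--
-- def getTriggerTime(increase: List[List[int]], requirements: List[List[int]]) -> List[int]:
--     n = len(increase)
--     a = [[0] * 3 for _ in range(n+1)]
--     for i in range(n):
--         for j in range(3):
--             a[i+1][j] = a[i][j] + increase[i][j]
--
--     def check(x, y, z, d):
--         return a[d][0] >= x and a[d][1] >= y and a[d][2] >= z
--
--     ans = []
--     for x, y, z in requirements:
--         l, r = -1, n+1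
--         while l + 1 < r:
--             mid = (l + r) >> 1
--             if check(x, y, z, mid):
--                 r = mid
--             else:
--                 l = mid
--         ans.append(r if r <= n else -1)
--     return ans
-- ===== SOURCE B (Python) =====
-- def getTriggerTime(increase, requirements):
--     days = [(0, 0, 0)]
--     c0 = c1 = c2 = 0
--     for inc in increase:
--         c0 += inc[0]; c1 += inc[1]; c2 += inc[2]
--         days.append((c0, c1, c2))
--     ans = []
--     for x, y, z in requirements:
--         for d, (p0, p1, p2) in enumerate(days):
--             if p0 >= x and p1 >= y and p2 >= z:
--                 ans.append(d)
--                 break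
--         else:
--             ans.append(-1)
--     return ans
-- ===== Notes on version B (the rewrite author's own statement) =====
-- stated objective: simpler
-- what changed: A answers each requirement with a binary search over the prefix-sum table; B builds the cumulative-day triples once and answers each requirement by a plain first-hit linear scan over them.
import Mathlib
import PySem

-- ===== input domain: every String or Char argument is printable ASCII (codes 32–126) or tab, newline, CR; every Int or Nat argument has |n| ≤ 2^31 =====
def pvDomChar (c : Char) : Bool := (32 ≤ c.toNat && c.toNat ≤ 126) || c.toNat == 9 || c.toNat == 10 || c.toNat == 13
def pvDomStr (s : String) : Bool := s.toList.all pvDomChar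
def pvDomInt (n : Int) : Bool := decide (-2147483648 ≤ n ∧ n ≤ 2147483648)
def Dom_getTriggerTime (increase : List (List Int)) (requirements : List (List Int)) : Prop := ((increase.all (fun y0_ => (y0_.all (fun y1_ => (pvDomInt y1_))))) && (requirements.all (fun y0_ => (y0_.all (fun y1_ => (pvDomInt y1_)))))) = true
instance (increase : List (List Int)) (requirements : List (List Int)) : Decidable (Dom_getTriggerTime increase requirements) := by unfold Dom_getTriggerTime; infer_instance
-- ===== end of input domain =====

-- B replaces A's per-requirement binary search by a plain first-hit linear scan over the
-- cumulative-attribute days; objective: simpler (not faster). Equivalence of return values on Pre_.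

-- ===== PORT A =====
-- a[i+1][j] = a[i][j] + increase[i][j]; row entries read via pyGetD (exact under Pre_: rows have ≥ 3 entries)
def pvBuildA (increase : List (List Int)) : List (List Int) :=
  (increase.foldl (fun (st : List (List Int) × List Int) row =>
      let nxt : List Int :=
        [PySem.List.pyGetD st.2 0 0 + PySem.List.pyGetD row 0 0,
         PySem.List.pyGetD st.2 1 0 + PySem.List.pyGetD row 1 0,
         PySem.List.pyGetD st.2 2 0 + PySem.List.pyGetD row 2 0]
      (st.1 ++ [nxt], nxt)) ([[0, 0, 0]], [0, 0, 0])).1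

-- check(x, y, z, d)
def pvCheckA (a : List (List Int)) (x y z d : Int) : Bool :=
  decide (x ≤ PySem.List.pyGetD (PySem.List.pyGetD a d []) 0 0) &&
  decide (y ≤ PySem.List.pyGetD (PySem.List.pyGetD a d []) 1 0) &&
  decide (z ≤ PySem.List.pyGetD (PySem.List.pyGetD a d []) 2 0)

-- the while-loop on l, r with mid = (l + r) >> 1 (arithmetic shift = floor division by 2)
def pvBSearch (a : List (List Int)) (x y z l r : Int) : Int :=
  if _h : l + 1 < r then
    if pvCheckA a x y z (PySem.Int.floordiv (l + r) 2) then
      pvBSearch a x y z l (PySem.Int.floordiv (l + r) 2)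
    else
      pvBSearch a x y z (PySem.Int.floordiv (l + r) 2) r
  else r
termination_by (r - l).toNat
decreasing_by
  all_goals
    simp only [PySem.Int.floordiv_eq_ediv_of_pos (by omega : (0:Int) < 2)]
    omega

def getTriggerTime (increase : List (List Int)) (requirements : List (List Int)) : List Int :=
  let n : Int := increase.length
  let a := pvBuildA increase
  requirements.foldl (fun ans row =>
    let x := PySem.List.pyGetD row 0 0
    let y := PySem.List.pyGetD row 1 0
    let z := PySem.List.pyGetD row 2 0
    let r := pvBSearch a x y z (-1) (n + 1)
    ans ++ [if r ≤ n then r else -1]) []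

-- ===== PORT B =====
-- days = running cumulative triples, day 0 included
def pvDays (increase : List (List Int)) : List (Int × Int × Int) :=
  (increase.foldl (fun (st : List (Int × Int × Int) × (Int × Int × Int)) inc =>
      let c : Int × Int × Int :=
        (st.2.1 + PySem.List.pyGetD inc 0 0,
         st.2.2.1 + PySem.List.pyGetD inc 1 0,
         st.2.2.2 + PySem.List.pyGetD inc 2 0)
      (st.1 ++ [c], c)) ([(0, 0, 0)], (0, 0, 0))).1

-- first day d with all three cumulative attributes ≥ the requirement, else -1
def pvScan (days : List (Int × Int × Int)) (x y z d : Int) : Int :=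
  match days with
  | [] => -1
  | c :: rest => if x ≤ c.1 ∧ y ≤ c.2.1 ∧ z ≤ c.2.2 then d else pvScan rest x y z (d + 1)

def getTriggerTime_alt (increase : List (List Int)) (requirements : List (List Int)) : List Int :=
  let days := pvDays increase
  requirements.foldl (fun ans row =>
    let x := PySem.List.pyGetD row 0 0
    let y := PySem.List.pyGetD row 1 0
    let z := PySem.List.pyGetD row 2 0
    ans ++ [pvScan days x y z 0]) []

-- ===== PRECONDITION & SPEC =====
-- Pre_ excludes (a) malformed rows, on which A raises (IndexError/ValueError: an increase row
-- shorter than 3, a requirements row not of length exactly 3), and (b) inputs with at least one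
-- requirement, at least two increase rows, and a negative gain among the first three entries of
-- some increase row: there the cumulative attributes are non-monotone, so A's binary-search
-- answer is an accident of probe order and B's first-qualifying-day answer is as defensible
-- (the underlying problem guarantees nonnegative gains).
def Pre_getTriggerTime (increase : List (List Int)) (requirements : List (List Int)) : Prop :=
  (∀ row ∈ increase, 3 ≤ row.length) ∧
  (∀ row ∈ requirements, row.length = 3) ∧
  (requirements = [] ∨ increase.length ≤ 1 ∨
    (∀ row ∈ increase, 0 ≤ row.getD 0 0 ∧ 0 ≤ row.getD 1 0 ∧ 0 ≤ row.getD 2 0))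
instance (increase : List (List Int)) (requirements : List (List Int)) : Decidable (Pre_getTriggerTime increase requirements) := by unfold Pre_getTriggerTime; infer_instance

def pvWitness_getTriggerTime : List (List Int) × List (List Int) :=
  ([[2, 8, 1], [2, 4, 16]], [[2, 11, 0], [15, 1, 2], [0, 0, 0]])

def Spec_getTriggerTime (increase : List (List Int)) (requirements : List (List Int)) (out : List Int) : Prop := out = getTriggerTime_alt increase requirements
instance (increase : List (List Int)) (requirements : List (List Int)) (out : List Int) : Decidable (Spec_getTriggerTime increase requirements out) := by unfold Spec_getTriggerTime; infer_instance

-- ===== CLAIM (what is proved, stated in full; the proofs are below) =====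
def Claim_equal_getTriggerTime : Prop := ∀ (increase : List (List Int)) (requirements : List (List Int)), Dom_getTriggerTime increase requirements → Pre_getTriggerTime increase requirements → Spec_getTriggerTime increase requirements (getTriggerTime increase requirements)

-- ===== LEMMAS AND PROOFS =====

def pvToRow (c : Int × Int × Int) : List Int := [c.1, c.2.1, c.2.2]

def pvLe3 (a b : Int × Int × Int) : Prop := a.1 ≤ b.1 ∧ a.2.1 ≤ b.2.1 ∧ a.2.2 ≤ b.2.2

@[reducible] def pvP (x y z : Int) (c : Int × Int × Int) : Prop := x ≤ c.1 ∧ y ≤ c.2.1 ∧ z ≤ c.2.2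

def pvStepA (st : List (List Int) × List Int) (row : List Int) : List (List Int) × List Int :=
  let nxt : List Int :=
    [PySem.List.pyGetD st.2 0 0 + PySem.List.pyGetD row 0 0,
     PySem.List.pyGetD st.2 1 0 + PySem.List.pyGetD row 1 0,
     PySem.List.pyGetD st.2 2 0 + PySem.List.pyGetD row 2 0]
  (st.1 ++ [nxt], nxt)

def pvStepB (st : List (Int × Int × Int) × (Int × Int × Int)) (inc : List Int) : List (Int × Int × Int) × (Int × Int × Int) :=
  let c : Int × Int × Int :=
    (st.2.1 + PySem.List.pyGetD inc 0 0,
     st.2.2.1 + PySem.List.pyGetD inc 1 0,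
     st.2.2.2 + PySem.List.pyGetD inc 2 0)
  (st.1 ++ [c], c)

lemma pvBuildA_def (increase : List (List Int)) :
    pvBuildA increase = (increase.foldl pvStepA ([[0,0,0]], [0,0,0])).1 := rfl

lemma pvDays_def (increase : List (List Int)) :
    pvDays increase = (increase.foldl pvStepB ([(0,0,0)], (0,0,0))).1 := rfl

lemma pvFoldAB (l : List (List Int)) (acc : List (Int × Int × Int)) (c : Int × Int × Int) :
    l.foldl pvStepA (acc.map pvToRow, pvToRow c)
      = ((l.foldl pvStepB (acc, c)).1.map pvToRow, pvToRow (l.foldl pvStepB (acc, c)).2) := by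
  induction l generalizing acc c with
  | nil => rfl
  | cons row rest ih =>
      simp only [List.foldl_cons]
      have hstep : pvStepA (acc.map pvToRow, pvToRow c) row
          = ((acc ++ [(pvStepB (acc, c) row).2]).map pvToRow, pvToRow (pvStepB (acc, c) row).2) := by
        simp [pvStepA, pvStepB, pvToRow, PySem.List.pyGetD]
      rw [hstep]
      have h2 := ih (acc ++ [(pvStepB (acc, c) row).2]) (pvStepB (acc, c) row).2
      simpa [pvStepB] using h2

lemma pvBuildA_eq (increase : List (List Int)) :
    pvBuildA increase = (pvDays increase).map pvToRow := by
  rw [pvBuildA_def, pvDays_def]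
  have h := pvFoldAB increase [(0,0,0)] (0,0,0)
  have h1 : ([(0,0,0)] : List (Int × Int × Int)).map pvToRow = [[0,0,0]] := by
    simp [pvToRow]
  have h2 : pvToRow (0,0,0) = [0,0,0] := by simp [pvToRow]
  rw [h1, h2] at h
  rw [h]

lemma pvDays_len_aux (l : List (List Int)) (acc : List (Int × Int × Int)) (c : Int × Int × Int) :
    (l.foldl pvStepB (acc, c)).1.length = acc.length + l.length := by
  induction l generalizing acc c with
  | nil => simp
  | cons row rest ih =>
      simp only [List.foldl_cons]
      have h := ih (acc ++ [(pvStepB (acc, c) row).2]) (pvStepB (acc, c) row).2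
      simp only [pvStepB] at h ⊢
      simp only [List.length_cons]
      rw [h]; simp; omega

lemma pvDays_length (increase : List (List Int)) :
    (pvDays increase).length = increase.length + 1 := by
  rw [pvDays_def, pvDays_len_aux]; simp [Nat.add_comm]

lemma pvPair_aux (l : List (List Int))
    (hl : ∀ row ∈ l, 3 ≤ row.length ∧ 0 ≤ row.getD 0 0 ∧ 0 ≤ row.getD 1 0 ∧ 0 ≤ row.getD 2 0)
    (acc : List (Int × Int × Int)) (c : Int × Int × Int)
    (hc : ∀ a ∈ acc, pvLe3 a c) (hp : acc.Pairwise pvLe3) :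
    ((l.foldl pvStepB (acc, c)).1.Pairwise pvLe3) ∧
      (∀ a ∈ (l.foldl pvStepB (acc, c)).1, pvLe3 a (l.foldl pvStepB (acc, c)).2) := by
  induction l generalizing acc c with
  | nil => exact ⟨hp, hc⟩
  | cons row rest ih =>
      simp only [List.foldl_cons]
      have hrow := hl row (by simp)
      have hg0 : 0 ≤ PySem.List.pyGetD row 0 0 := by
        rw [show ((0:Int)) = ((0:Nat) : Int) by simp, PySem.List.pyGetD_natCast]
        exact hrow.2.1
      have hg1 : 0 ≤ PySem.List.pyGetD row 1 0 := by
        rw [show ((1:Int)) = ((1:Nat) : Int) by simp, PySem.List.pyGetD_natCast]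
        exact hrow.2.2.1
      have hg2 : 0 ≤ PySem.List.pyGetD row 2 0 := by
        rw [show ((2:Int)) = ((2:Nat) : Int) by simp, PySem.List.pyGetD_natCast]
        exact hrow.2.2.2
      have hcc' : pvLe3 c (pvStepB (acc, c) row).2 := by
        refine ⟨?_, ?_, ?_⟩ <;> simp [pvStepB] <;> omega
      have hc' : ∀ a ∈ (pvStepB (acc, c) row).1, pvLe3 a (pvStepB (acc, c) row).2 := by
        intro a ha
        simp only [pvStepB, List.mem_append, List.mem_singleton] at ha
        rcases ha with ha | ha
        · have h1 := hc a ha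
          exact ⟨le_trans h1.1 hcc'.1, le_trans h1.2.1 hcc'.2.1, le_trans h1.2.2 hcc'.2.2⟩
        · subst ha; exact ⟨le_refl _, le_refl _, le_refl _⟩
      have hp' : ((pvStepB (acc, c) row).1).Pairwise pvLe3 := by
        simp only [pvStepB]
        rw [List.pairwise_append]
        refine ⟨hp, by simp, ?_⟩
        intro a ha b hb
        simp only [List.mem_singleton] at hb
        subst hb
        have h1 := hc a ha
        exact ⟨le_trans h1.1 hcc'.1, le_trans h1.2.1 hcc'.2.1, le_trans h1.2.2 hcc'.2.2⟩
      have hrec := ih (fun r hr => hl r (List.mem_cons_of_mem _ hr))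
        ((pvStepB (acc, c) row).1) ((pvStepB (acc, c) row).2) hc' hp'
      simpa using hrec

lemma pvDays_mono (increase : List (List Int))
    (hpre : ∀ row ∈ increase, 3 ≤ row.length ∧ 0 ≤ row.getD 0 0 ∧ 0 ≤ row.getD 1 0 ∧ 0 ≤ row.getD 2 0)
    (i j : Nat) (hij : i ≤ j) (hi : i < (pvDays increase).length) (hj : j < (pvDays increase).length) :
    pvLe3 (pvDays increase)[i] (pvDays increase)[j] := by
  rcases Nat.lt_or_ge i j with h | h
  · have hp : (pvDays increase).Pairwise pvLe3 := by
      rw [pvDays_def]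
      exact (pvPair_aux increase hpre [(0,0,0)] (0,0,0)
        (by intro a ha; simp at ha; subst ha; exact ⟨le_refl _, le_refl _, le_refl _⟩)
        (by simp)).1
    exact List.pairwise_iff_getElem.mp hp i j hi hj h
  · have : i = j := by omega
    subst this; exact ⟨le_refl _, le_refl _, le_refl _⟩

lemma pvCheck_eq (increase : List (List Int)) (x y z : Int) (d : Nat)
    (hd : d < (pvDays increase).length) :
    pvCheckA (pvBuildA increase) x y z (d : Int) = decide (pvP x y z (pvDays increase)[d]) := by
  rw [pvBuildA_eq]
  have hget : PySem.List.pyGetD ((pvDays increase).map pvToRow) (d : Int) []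
      = pvToRow (pvDays increase)[d] := by
    rw [PySem.List.pyGetD_eq_getElem _ _ (by omega) (by simpa using hd)]
    simp
  simp only [pvCheckA, hget, pvToRow, pvP]
  simp [PySem.List.pyGetD]
  rw [Bool.and_assoc]

lemma pvScan_spec (days : List (Int × Int × Int)) (x y z : Int) (d0 : Nat) :
    (pvScan days x y z (d0 : Int) = -1 ∧ ∀ i (h : i < days.length), ¬ pvP x y z days[i]) ∨
    (∃ k, ∃ h : k < days.length, pvScan days x y z (d0 : Int) = ((d0 + k : Nat) : Int) ∧
      pvP x y z days[k] ∧ ∀ i (_h' : i < k) (hik : i < days.length), ¬ pvP x y z days[i]) := by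
  induction days generalizing d0 with
  | nil => exact Or.inl ⟨rfl, fun i h => by simp at h⟩
  | cons c rest ih =>
      by_cases hc : x ≤ c.1 ∧ y ≤ c.2.1 ∧ z ≤ c.2.2
      · refine Or.inr ⟨0, by simp, ?_, by simpa [pvP] using hc, fun i h' _ => absurd h' (by omega)⟩
        simp [pvScan, hc]
      · have hstep : pvScan (c :: rest) x y z (d0 : Int)
            = pvScan rest x y z ((d0 + 1 : Nat) : Int) := by
          have h1 : ((d0 + 1 : Nat) : Int) = (d0 : Int) + 1 := by push_cast; ring
          rw [h1]; simp [pvScan, hc]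
        rcases ih (d0 + 1) with ⟨h1, h2⟩ | ⟨k, hk, heq, hP, hmin⟩
        · refine Or.inl ⟨by rw [hstep]; exact h1, ?_⟩
          intro i h
          cases i with
          | zero => simpa [pvP] using hc
          | succ m => simpa using h2 m (by simpa using h)
        · refine Or.inr ⟨k + 1, by simpa using hk, ?_, by simpa using hP, ?_⟩
          · rw [hstep, heq]; push_cast; ring
          · intro i h' hik
            cases i with
            | zero => simpa [pvP] using hc
            | succ m => simpa using hmin m (by omega) (by simpa using hik)

lemma pvBSearch_spec (increase : List (List Int)) (x y z : Int)
    (hpre : ∀ row ∈ increase, 3 ≤ row.length ∧ 0 ≤ row.getD 0 0 ∧ 0 ≤ row.getD 1 0 ∧ 0 ≤ row.getD 2 0) :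
    ∀ (m : Nat) (l r : Int), (r - l).toNat = m →
    -1 ≤ l → l < r → r ≤ (increase.length : Int) + 1 →
    (∀ d : Nat, (d : Int) ≤ l → ∀ _h : d < (pvDays increase).length, ¬ pvP x y z (pvDays increase)[d]) →
    (∀ d : Nat, r ≤ (d : Int) → ∀ _h : d < (pvDays increase).length, pvP x y z (pvDays increase)[d]) →
    pvBSearch (pvBuildA increase) x y z l r =
      (if pvScan (pvDays increase) x y z 0 = -1 then (increase.length : Int) + 1
       else pvScan (pvDays increase) x y z 0) := by
  intro m
  induction m using Nat.strong_induction_on with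
  | _ m ihm =>
    intro l r hm hl hlr hr hlow hhigh
    have hlen := pvDays_length increase
    by_cases hstep : l + 1 < r
    · rw [pvBSearch]
      rw [dif_pos hstep]
      set mid := PySem.Int.floordiv (l + r) 2 with hmiddef
      have hmid' : mid = (l + r) / 2 := by
        rw [hmiddef, PySem.Int.floordiv_eq_ediv_of_pos (by omega : (0:Int) < 2)]
      have hlm : l < mid := by omega
      have hmr : mid < r := by omega
      have hmidNat : mid.toNat < (pvDays increase).length := by omega
      have hmidcast : ((mid.toNat : Int)) = mid := by omega
      have hcheck := pvCheck_eq increase x y z mid.toNat hmidNat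
      rw [hmidcast] at hcheck
      by_cases hP : pvP x y z (pvDays increase)[mid.toNat]
      · rw [hcheck]; simp only [decide_eq_true_eq]; rw [if_pos hP]
        apply ihm (mid - l).toNat (by omega) l mid rfl hl hlm (by omega) hlow
        intro d hd hdlen
        have hmono := pvDays_mono increase hpre mid.toNat d (by omega) hmidNat hdlen
        exact ⟨le_trans hP.1 hmono.1, le_trans hP.2.1 hmono.2.1, le_trans hP.2.2 hmono.2.2⟩
      · rw [hcheck]; simp only [decide_eq_true_eq]; rw [if_neg hP]
        apply ihm (r - mid).toNat (by omega) mid r rfl (by omega) hmr hr ?_ hhigh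
        intro d hd hdlen hPd
        have hmono := pvDays_mono increase hpre d mid.toNat (by omega) hdlen hmidNat
        exact hP ⟨le_trans hPd.1 hmono.1, le_trans hPd.2.1 hmono.2.1, le_trans hPd.2.2 hmono.2.2⟩
    · rw [pvBSearch]
      rw [dif_neg hstep]
      rcases pvScan_spec (pvDays increase) x y z 0 with ⟨hval, hnone⟩ | ⟨k, hk, heq, hP, hmin⟩
      · simp only [Nat.cast_zero] at hval
        rw [hval, if_pos rfl]
        by_contra hne
        have hrle : r ≤ (increase.length : Int) := by omega
        have hrlen : r.toNat < (pvDays increase).length := by omega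
        exact hnone r.toNat hrlen (hhigh r.toNat (by omega) hrlen)
      · simp only [Nat.cast_zero, Nat.zero_add] at heq
        have hne : pvScan (pvDays increase) x y z 0 ≠ -1 := by
          rw [heq]; intro hbad; omega
        rw [if_neg hne, heq]
        have hkgt : l < (k : Int) := by
          by_contra hle
          push Not at hle
          exact hlow k hle hk hP
        have hkle : (k : Int) ≤ r := by
          by_contra hgt
          push Not at hgt
          have hrlen : r.toNat < (pvDays increase).length := by omega
          exact hmin r.toNat (by omega) hrlen (hhigh r.toNat (by omega) hrlen)
        omega

lemma pvRow_eq (increase : List (List Int)) (x y z : Int)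
    (hpre : ∀ row ∈ increase, 3 ≤ row.length ∧ 0 ≤ row.getD 0 0 ∧ 0 ≤ row.getD 1 0 ∧ 0 ≤ row.getD 2 0) :
    (if pvBSearch (pvBuildA increase) x y z (-1) ((increase.length : Int) + 1) ≤ (increase.length : Int)
     then pvBSearch (pvBuildA increase) x y z (-1) ((increase.length : Int) + 1) else -1)
      = pvScan (pvDays increase) x y z 0 := by
  have hlen := pvDays_length increase
  have hb := pvBSearch_spec increase x y z hpre
    (((increase.length : Int) + 1) - (-1)).toNat (-1) ((increase.length : Int) + 1) rfl
    (by omega) (by omega) (le_refl _)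
    (by intro d hd _; exfalso; omega)
    (by intro d hd hdlen; exfalso; omega)
  rcases pvScan_spec (pvDays increase) x y z 0 with ⟨hval, _⟩ | ⟨k, hk, heq, _, _⟩
  · simp only [Nat.cast_zero] at hval
    rw [hval] at hb ⊢
    rw [if_pos rfl] at hb
    rw [hb, if_neg (by omega)]
  · simp only [Nat.cast_zero, Nat.zero_add] at heq
    have hne : pvScan (pvDays increase) x y z 0 ≠ -1 := by
      rw [heq]; intro hbad; omega
    rw [if_neg hne] at hb
    rw [hb, if_pos (by rw [heq]; omega)]


-- with at most one increase row (days 0 and 1 only) the bisection agrees with the scan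
-- regardless of the sign of the gains
lemma pvRow_eq_small (increase : List (List Int)) (x y z : Int)
    (hsmall : increase.length ≤ 1) :
    (if pvBSearch (pvBuildA increase) x y z (-1) ((increase.length : Int) + 1) ≤ (increase.length : Int)
     then pvBSearch (pvBuildA increase) x y z (-1) ((increase.length : Int) + 1) else -1)
      = pvScan (pvDays increase) x y z 0 := by
  rcases increase with _ | ⟨row, _ | ⟨row2, rest⟩⟩
  · have hd := pvCheck_eq [] x y z 0 (by simp [pvDays_length])
    simp only [Nat.cast_zero] at hd
    have hdays : pvDays ([] : List (List Int)) = [(0, 0, 0)] := rfl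
    simp only [hdays, List.getElem_cons_zero] at hd
    have e1 : pvBSearch (pvBuildA []) x y z (-1) 1
        = if pvP x y z (0, 0, 0) then 0 else 1 := by
      rw [pvBSearch, dif_pos (by omega)]
      have hm : PySem.Int.floordiv ((-1) + 1) 2 = 0 := by decide
      rw [hm, hd]
      simp only [decide_eq_true_eq]
      by_cases h : pvP x y z (0, 0, 0)
      · rw [if_pos h, if_pos h, pvBSearch, dif_neg (by omega)]
      · rw [if_neg h, if_neg h, pvBSearch, dif_neg (by omega)]
    simp only [List.length_nil, Nat.cast_zero, zero_add, e1, hdays]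
    by_cases h : pvP x y z (0, 0, 0)
    · rw [if_pos h, if_pos (by omega)]
      simp [pvScan, pvP] at h ⊢
      tauto
    · rw [if_neg h, if_neg (by omega)]
      simp [pvScan, pvP] at h ⊢
      tauto
  · have hlen : (pvDays [row]).length = 2 := by simp [pvDays_length]
    have hd0 := pvCheck_eq [row] x y z 0 (by omega)
    have hd1 := pvCheck_eq [row] x y z 1 (by omega)
    simp only [Nat.cast_zero, Nat.cast_one] at hd0 hd1
    have hdays : pvDays [row]
        = [(0, 0, 0), (0 + PySem.List.pyGetD row 0 0, 0 + PySem.List.pyGetD row 1 0,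
            0 + PySem.List.pyGetD row 2 0)] := rfl
    set c : Int × Int × Int := (0 + PySem.List.pyGetD row 0 0, 0 + PySem.List.pyGetD row 1 0,
        0 + PySem.List.pyGetD row 2 0) with hc
    simp only [hdays, List.getElem_cons_zero, List.getElem_cons_succ] at hd0 hd1
    have e1 : pvBSearch (pvBuildA [row]) x y z (-1) 2
        = if pvP x y z (0, 0, 0) then 0 else if pvP x y z c then 1 else 2 := by
      rw [pvBSearch, dif_pos (by omega)]
      have hm : PySem.Int.floordiv ((-1) + 2) 2 = 0 := by decide
      rw [hm, hd0]
      simp only [decide_eq_true_eq]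
      by_cases h0 : pvP x y z (0, 0, 0)
      · rw [if_pos h0, if_pos h0, pvBSearch, dif_neg (by omega)]
      · rw [if_neg h0, if_neg h0, pvBSearch, dif_pos (by omega)]
        have hm2 : PySem.Int.floordiv (0 + 2) 2 = 1 := by decide
        rw [hm2, hd1]
        simp only [decide_eq_true_eq]
        by_cases h1 : pvP x y z c
        · rw [if_pos h1, if_pos h1, pvBSearch, dif_neg (by omega)]
        · rw [if_neg h1, if_neg h1, pvBSearch, dif_neg (by omega)]
    rw [show (([row] : List (List Int)).length : Int) + 1 = 2 from by norm_num, e1,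
      show (([row] : List (List Int)).length : Int) = 1 from by norm_num, hdays]
    have hscan : pvScan [((0:Int), (0:Int), (0:Int)), c] x y z 0
        = if pvP x y z (0, 0, 0) then 0 else if pvP x y z c then 1 else -1 := by
      simp [pvScan, pvP]
    rw [hscan]
    split_ifs <;> omega
  · simp at hsmall

-- ===== VERDICT (by name: the statement is the Claim_ definition above) =====
theorem getTriggerTime_spec : Claim_equal_getTriggerTime := by
  intro increase requirements _hdom hpre
  obtain ⟨hlen3, _hreq, hcase⟩ := hpre
  unfold Spec_getTriggerTime
  rcases hcase with hempty | h2
  · subst hempty; rfl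
  · rcases h2 with hsmall | hnonneg
    · simp only [getTriggerTime, getTriggerTime_alt]
      rw [PySem.List.foldl_append_singleton_eq_map, PySem.List.foldl_append_singleton_eq_map]
      simp only [List.nil_append]
      apply List.map_congr_left
      intro row _
      exact pvRow_eq_small increase (PySem.List.pyGetD row 0 0) (PySem.List.pyGetD row 1 0)
        (PySem.List.pyGetD row 2 0) hsmall
    · simp only [getTriggerTime, getTriggerTime_alt]
      rw [PySem.List.foldl_append_singleton_eq_map, PySem.List.foldl_append_singleton_eq_map]
      simp only [List.nil_append]
      apply List.map_congr_left
      intro row _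
      exact pvRow_eq increase (PySem.List.pyGetD row 0 0) (PySem.List.pyGetD row 1 0)
        (PySem.List.pyGetD row 2 0) (fun r hr => ⟨hlen3 r hr, hnonneg r hr⟩)
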